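-- pv_equiv track=rewrite | github.com/CitiCup-Lokout/datamining | dataminer.py | fixMergedVideoData
-- ===== SOURCE A (Python) =====
-- def fixMergedVideoData(json_buf):
--     replacements = (
--         ('Aid', 'AVNum'), ('Name', 'Topic'), ('Time', 'UploadTime')
--         , ('Danmaku', 'DMNum'), ('DMnum', 'DMNum'), ('reply', 'Comment')
--         , ('favorite', 'Save'), ('coin', 'Coin'), ('like', 'Like')
--     )
--     for origin, to in replacements:
--         json_buf = json_buf.replace('"%s":' % origin, '"%s":' % to)
--     return json_buf
-- ===== SOURCE B (Python) =====
-- def fixMergedVideoData(json_buf):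
--     mapping = {
--         'Aid': 'AVNum', 'Name': 'Topic', 'Time': 'UploadTime',
--         'Danmaku': 'DMNum', 'DMnum': 'DMNum', 'reply': 'Comment',
--         'favorite': 'Save', 'coin': 'Coin', 'like': 'Like',
--     }
--     out = []
--     i = 0
--     n = len(json_buf)
--     while i < n:
--         c = json_buf[i]
--         if c == '"':
--             for k, v in mapping.items():
--                 if json_buf.startswith(k + '":', i + 1):
--                     out.append('"' + v + '":')
--                     i += len(k) + 3
--                     break
--             else:
--                 out.append(c)
--                 i += 1
--         else:
--             out.append(c)
--             i += 1
--     return ''.join(out)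
-- ===== Notes on version B (the rewrite author's own statement) =====
-- stated objective: alternative
-- what changed: Replaces A's nine sequential full-buffer str.replace passes with a single left-to-right scan that, at each double-quote character, looks the key up in a mapping table built once and copies or rewrites the token in one pass.
import Mathlib
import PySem

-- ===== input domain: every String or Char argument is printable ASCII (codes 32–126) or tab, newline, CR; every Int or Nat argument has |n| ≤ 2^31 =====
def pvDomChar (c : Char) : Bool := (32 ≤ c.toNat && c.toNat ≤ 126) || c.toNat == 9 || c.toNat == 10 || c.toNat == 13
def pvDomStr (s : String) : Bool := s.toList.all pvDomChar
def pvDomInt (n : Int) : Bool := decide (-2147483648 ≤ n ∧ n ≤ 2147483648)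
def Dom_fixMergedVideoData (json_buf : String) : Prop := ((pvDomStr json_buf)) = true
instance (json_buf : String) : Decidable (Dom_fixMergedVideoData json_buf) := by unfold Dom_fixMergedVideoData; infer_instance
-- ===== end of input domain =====

-- B replaces A's nine sequential full-buffer str.replace passes by one table-driven
-- left-to-right scan over the string (objective: alternative; not faster in CPython).


-- ===== PORT A =====
-- literal transliteration: nine sequential full-buffer replaces of '"%s":' tokens
def fixMergedVideoData (json_buf : String) : String :=
  let replacements : List (String × String) :=
    [("Aid", "AVNum"), ("Name", "Topic"), ("Time", "UploadTime"),
     ("Danmaku", "DMNum"), ("DMnum", "DMNum"), ("reply", "Comment"),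
     ("favorite", "Save"), ("coin", "Coin"), ("like", "Like")]
  replacements.foldl
    (fun buf ot => PySem.Str.replace buf ("\"" ++ ot.1 ++ "\":") ("\"" ++ ot.2 ++ "\":"))
    json_buf

-- ===== PORT B =====
-- the dict `mapping` of Source B as an association list in insertion order
def pvMapping : List (String × String) :=
  [("Aid", "AVNum"), ("Name", "Topic"), ("Time", "UploadTime"),
   ("Danmaku", "DMNum"), ("DMnum", "DMNum"), ("reply", "Comment"),
   ("favorite", "Save"), ("coin", "Coin"), ("like", "Like")]

-- Source B's inner `for k, v in mapping.items(): if json_buf.startswith(k + '":', i+1)` loop: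
-- returns the replacement characters and how many input characters the token consumed
def pvFindTok (cs : List Char) : List (String × String) → Option (List Char × Nat)
  | [] => none
  | (k, v) :: rest =>
    if (k.toList ++ ['"', ':']).isPrefixOf cs then some (v.toList, k.toList.length + 2)
    else pvFindTok cs rest

-- Source B's while-loop over the buffer, one left-to-right pass
def pvScan : List Char → List Char
  | [] => []
  | c :: t =>
    if c = '"' then
      match pvFindTok t pvMapping with
      | some (v, n) => ('"' :: (v ++ ['"', ':'])) ++ pvScan (t.drop n)
      | none => c :: pvScan t
    else c :: pvScan t
termination_by l => l.length
decreasing_by all_goals simp [List.length_drop]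

def fixMergedVideoData_alt (json_buf : String) : String :=
  String.ofList (pvScan json_buf.toList)

-- ===== PRECONDITION & SPEC =====
def Spec_fixMergedVideoData (json_buf : String) (out : String) : Prop := out = fixMergedVideoData_alt json_buf
instance (json_buf : String) (out : String) : Decidable (Spec_fixMergedVideoData json_buf out) := by unfold Spec_fixMergedVideoData; infer_instance

-- ===== CLAIM (what is proved, stated in full; the proofs are below) =====
def Claim_equal_fixMergedVideoData : Prop := ∀ (json_buf : String), Dom_fixMergedVideoData json_buf → Spec_fixMergedVideoData json_buf (fixMergedVideoData json_buf)

-- ===== LEMMAS AND PROOFS =====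

-- structural characterization of PySem.Chars.replace (for a nonempty pattern)
def pvRep (old new : List Char) : List Char → List Char
  | [] => []
  | c :: t =>
    if old.isPrefixOf (c :: t) ∧ old ≠ [] then
      new ++ pvRep old new (t.drop (old.length - 1))
    else
      c :: pvRep old new t
termination_by l => l.length
decreasing_by all_goals simp [List.length_drop]

theorem pvGo_eq (old new : List Char) (hold : old ≠ []) :
    ∀ fuel l acc, l.length ≤ fuel →
      PySem.Chars.replace.go old new fuel l acc = acc.reverse ++ pvRep old new l := by
  intro fuel
  induction fuel with
  | zero =>
    intro l acc hl
    have : l = [] := by cases l <;> simp_all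
    subst this
    simp [PySem.Chars.replace.go, pvRep]
  | succ n ih =>
    intro l acc hl
    cases l with
    | nil => simp [PySem.Chars.replace.go, pvRep]
    | cons c t =>
      rw [PySem.Chars.replace.go]
      by_cases hp : old.isPrefixOf (c :: t)
      · rw [if_pos hp]
        obtain ⟨o, os, rfl⟩ : ∃ o os, old = o :: os := by
          cases old with
          | nil => exact absurd rfl hold
          | cons o os => exact ⟨o, os, rfl⟩
        have hdrop : List.drop (o :: os).length (c :: t) = t.drop ((o :: os).length - 1) := by
          simp
        rw [ih (List.drop (o :: os).length (c :: t)) (new.reverse ++ acc)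
            (by simp at hl ⊢; omega)]
        rw [pvRep]
        rw [if_pos ⟨hp, hold⟩]
        rw [hdrop]
        simp
      · rw [if_neg hp]
        rw [ih t (c :: acc) (by simp at hl; omega)]
        rw [pvRep, if_neg (by simp [hp])]
        simp

theorem pvReplace_eq (s old new : List Char) (hold : old ≠ []) :
    PySem.Chars.replace s old new = pvRep old new s := by
  rw [PySem.Chars.replace]
  rw [if_neg (by simp [List.isEmpty_iff, hold])]
  rw [pvGo_eq old new hold s.length s [] (le_refl _)]
  simp

theorem pvRep_nil (old new : List Char) : pvRep old new [] = [] := by rw [pvRep]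

theorem pvRep_nomatch {old : List Char} (new : List Char) {c : Char} {t : List Char}
    (h : ¬ old <+: (c :: t)) : pvRep old new (c :: t) = c :: pvRep old new t := by
  rw [pvRep, if_neg (by simp [List.isPrefixOf_iff_prefix, h])]

theorem pvRep_prefix {old : List Char} (new : List Char) (x : List Char) (hold : old ≠ []) :
    pvRep old new (old ++ x) = new ++ pvRep old new x := by
  obtain ⟨o, os, rfl⟩ : ∃ o os, old = o :: os := by
    cases old with
    | nil => exact absurd rfl hold
    | cons o os => exact ⟨o, os, rfl⟩
  rw [show ((o :: os) ++ x : List Char) = o :: (os ++ x) from rfl, pvRep]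
  rw [if_pos ⟨by rw [List.isPrefixOf_iff_prefix]; exact ⟨x, by simp⟩, hold⟩]
  have : (os ++ x).drop ((o :: os).length - 1) = x := by
    simp
  rw [this]

-- pat cannot match anywhere strictly inside pre (checked positionally, independent of
-- what follows pre)
def pvBlockedB (pat pre : List Char) : Bool :=
  (List.range pre.length).all fun i =>
    (List.range pat.length).any fun j =>
      decide (i + j < pre.length) && decide (pre.getD (i + j) ' ' ≠ pat.getD j ' ')

theorem pvBlockedB_not_prefix {pat pre : List Char} (hb : pvBlockedB pat pre = true)
    (hpre : pre ≠ []) (x : List Char) : ¬ pat <+: (pre ++ x) := by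
  intro hp
  have h0 : 0 < pre.length := List.length_pos_iff.mpr hpre
  simp only [pvBlockedB, List.all_eq_true, List.any_eq_true, List.mem_range,
    Bool.and_eq_true, decide_eq_true_eq] at hb
  obtain ⟨j, hj, hjl, hne⟩ := hb 0 h0
  simp only [Nat.zero_add] at hjl hne
  apply hne
  obtain ⟨u, hu⟩ := hp
  have h1 : (pre ++ x).getD j ' ' = pre.getD j ' ' := by
    rw [List.getD, List.getD, List.getElem?_append_left hjl]
  have h2 : (pat ++ u).getD j ' ' = pat.getD j ' ' := by
    rw [List.getD, List.getD, List.getElem?_append_left hj]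
  rw [← h1, ← hu, h2]

theorem pvBlockedB_tail {pat : List Char} {c : Char} {pre : List Char}
    (h : pvBlockedB pat (c :: pre) = true) : pvBlockedB pat pre = true := by
  simp only [pvBlockedB, List.all_eq_true, List.any_eq_true, List.mem_range,
    Bool.and_eq_true, decide_eq_true_eq] at h ⊢
  intro i hi
  obtain ⟨j, hj, hjl, hne⟩ := h (i + 1) (by simp; omega)
  refine ⟨j, hj, by simp at hjl; omega, ?_⟩
  have : (c :: pre).getD (i + 1 + j) ' ' = pre.getD (i + j) ' ' := by
    have : i + 1 + j = (i + j) + 1 := by omega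
    rw [this]; rfl
  rwa [this] at hne

theorem pvRep_append_blocked {pat : List Char} (new : List Char) {pre : List Char}
    (hb : pvBlockedB pat pre = true) (x : List Char) :
    pvRep pat new (pre ++ x) = pre ++ pvRep pat new x := by
  induction pre with
  | nil => simp
  | cons c pre ih =>
    simp only [List.cons_append]
    have hnp : ¬ pat <+: (c :: (pre ++ x)) := by
      simpa using pvBlockedB_not_prefix hb (by simp) x
    rw [pvRep_nomatch new hnp]
    rw [ih (pvBlockedB_tail hb)]

-- no nonempty tail of P is prefix-comparable with rep
def pvNoCrossB (rep P : List Char) : Bool :=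
  (List.range (P.length + 1)).all fun m =>
    (P.drop m).isEmpty || (!(P.drop m).isPrefixOf rep && !rep.isPrefixOf (P.drop m))

theorem pvNoCrossB_spec {rep P : List Char} (h : pvNoCrossB rep P = true)
    {m : Nat} (hm : m ≤ P.length) (hne : P.drop m ≠ []) :
    ¬ (P.drop m <+: rep) ∧ ¬ (rep <+: P.drop m) := by
  simp only [pvNoCrossB, List.all_eq_true, List.mem_range, Bool.or_eq_true,
    Bool.and_eq_true, Bool.not_eq_true', List.isEmpty_iff] at h
  have := h m (by omega)
  rcases this with h1 | ⟨h1, h2⟩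
  · exact absurd h1 hne
  · constructor
    · rw [← List.isPrefixOf_iff_prefix]; simp [h1]
    · rw [← List.isPrefixOf_iff_prefix]; simp [h2]

-- back-propagation: a tail of P surviving as a prefix of the replaced string was
-- already a prefix of the original string
theorem pvRep_prefix_back {pat new P : List Char} (hnc : pvNoCrossB new P = true) :
    ∀ t m, m ≤ P.length → (P.drop m) <+: pvRep pat new t → (P.drop m) <+: t := by
  intro t
  induction t with
  | nil =>
    intro m _ h
    rw [pvRep_nil] at h
    rw [List.prefix_nil] at h
    rw [h]
  | cons c t ih =>
    intro m hm h
    by_cases hS : P.drop m = []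
    · rw [hS]; exact List.nil_prefix
    rw [pvRep] at h
    by_cases hp : pat.isPrefixOf (c :: t) ∧ pat ≠ []
    · rw [if_pos hp] at h
      exfalso
      rcases pvNoCrossB_spec hnc hm hS with ⟨hn1, hn2⟩
      by_cases hlen : (P.drop m).length ≤ new.length
      · exact hn1 (List.prefix_of_prefix_length_le h (List.prefix_append _ _) hlen)
      · exact hn2 (List.prefix_of_prefix_length_le (List.prefix_append _ _) h (by omega))
    · rw [if_neg hp] at h
      have hmP : m < P.length := by
        by_contra hc
        exact hS (List.drop_eq_nil_of_le (by omega))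
      rw [List.drop_eq_getElem_cons hmP] at h ⊢
      rw [List.cons_prefix_cons] at h ⊢
      exact ⟨h.1, ih (m + 1) (by omega) h.2⟩

theorem pvRep_not_prefix_back {pat new P : List Char} (hnc : pvNoCrossB new P = true)
    {t : List Char} (h : ¬ P <+: t) : ¬ P <+: pvRep pat new t := by
  intro hc
  exact h (by simpa using pvRep_prefix_back hnc t 0 (by omega) (by simpa using hc))

-- char-level versions of the token table
def pvKV : List (List Char × List Char) := pvMapping.map fun p => (p.1.toList, p.2.toList)

def pvK (k : List Char) : List Char := k ++ ['"', ':']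

def pvTok (k : List Char) : List Char := '"' :: pvK k

def pvFold (m : List (List Char × List Char)) (l : List Char) : List Char :=
  m.foldl (fun s p => pvRep (pvTok p.1) (pvTok p.2) s) l

-- the three decidable combinatorial facts about the nine tokens
theorem pvBlockedKeys : ∀ p ∈ pvKV, ∀ q ∈ pvKV, p.1 ≠ q.1 →
    pvBlockedB (pvTok p.1) (pvTok q.1) = true := by decide

theorem pvBlockedVals : ∀ p ∈ pvKV, ∀ q ∈ pvKV,
    pvBlockedB (pvTok p.1) (pvTok q.2) = true := by decide

theorem pvNoCrossAll : ∀ p ∈ pvKV, ∀ q ∈ pvKV,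
    pvNoCrossB (pvTok p.2) (pvK q.1) = true := by decide

theorem pvFold_nil : ∀ m, pvFold m [] = [] := by
  intro m
  induction m with
  | nil => rfl
  | cons p m ih => simp only [pvFold, List.foldl_cons] at ih ⊢; rw [pvRep_nil]; exact ih

theorem pvFold_cons_nonquote {c : Char} (hc : c ≠ '"') :
    ∀ m s, pvFold m (c :: s) = c :: pvFold m s := by
  intro m
  induction m with
  | nil => intro s; rfl
  | cons p m ih =>
    intro s
    simp only [pvFold, List.foldl_cons] at ih ⊢
    rw [pvRep_nomatch _ (by rw [pvTok, List.cons_prefix_cons]; rintro ⟨h, -⟩; exact hc h.symm)]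
    exact ih _

theorem pvFold_cons_quote_nomatch :
    ∀ m, (∀ p ∈ m, p ∈ pvKV) →
      ∀ s, (∀ p ∈ m, ¬ pvK p.1 <+: s) → pvFold m ('"' :: s) = '"' :: pvFold m s := by
  intro m
  induction m with
  | nil => intro _ s _; rfl
  | cons p m ih =>
    intro hsub s hna
    simp only [pvFold, List.foldl_cons]
    rw [pvRep_nomatch _ (by
      rw [pvTok, List.cons_prefix_cons]
      rintro ⟨-, h⟩
      exact hna p (by simp) h)]
    exact ih (fun q hq => hsub q (by simp [hq]))
      (pvRep (pvTok p.1) (pvTok p.2) s)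
      (fun q hq => pvRep_not_prefix_back
        (pvNoCrossAll p (hsub p (by simp)) q (hsub q (by simp [hq])))
        (hna q (by simp [hq])))

theorem pvFold_append_keyblocked {k : List Char} :
    ∀ m, (∀ p ∈ m, pvBlockedB (pvTok p.1) (pvTok k) = true) →
      ∀ x, pvFold m (pvTok k ++ x) = pvTok k ++ pvFold m x := by
  intro m
  induction m with
  | nil => intro _ x; rfl
  | cons p m ih =>
    intro hb x
    simp only [pvFold, List.foldl_cons]
    rw [pvRep_append_blocked _ (hb p (by simp)) x]
    exact ih (fun q hq => hb q (by simp [hq])) _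

-- pvFindTok characterizations
theorem pvFindTok_none {cs : List Char} :
    ∀ m, pvFindTok cs m = none → ∀ p ∈ m, ¬ (p.1.toList ++ ['"', ':']) <+: cs := by
  intro m
  induction m with
  | nil => intro _ p hp; simp at hp
  | cons q m ih =>
    intro h p hp
    obtain ⟨k, v⟩ := q
    rw [pvFindTok] at h
    by_cases hk : (k.toList ++ ['"', ':']).isPrefixOf cs
    · rw [if_pos hk] at h; exact absurd h (by simp)
    · rw [if_neg hk] at h
      rcases (by simpa using hp : p = (k, v) ∨ p ∈ m) with rfl | hp'
      · simpa [List.isPrefixOf_iff_prefix] using hk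
      · exact ih h p hp'

theorem pvFindTok_some {cs : List Char} {v : List Char} {n : Nat} :
    ∀ m, pvFindTok cs m = some (v, n) →
      ∃ ma k vs mb, m = ma ++ (k, vs) :: mb ∧ v = vs.toList ∧ n = k.toList.length + 2 ∧
        (k.toList ++ ['"', ':']) <+: cs ∧
        ∀ p ∈ ma, ¬ (p.1.toList ++ ['"', ':']) <+: cs := by
  intro m
  induction m with
  | nil => intro h; exact absurd h (by rw [pvFindTok]; simp)
  | cons q m ih =>
    intro h
    obtain ⟨k, v'⟩ := q
    rw [pvFindTok] at h
    by_cases hk : (k.toList ++ ['"', ':']).isPrefixOf cs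
    · rw [if_pos hk] at h
      obtain ⟨h1, h2⟩ : v'.toList = v ∧ k.toList.length + 2 = n := by
        simpa using h
      exact ⟨[], k, v', m, by simp, h1.symm, h2.symm,
        (List.isPrefixOf_iff_prefix).mp hk, by simp⟩
    · rw [if_neg hk] at h
      obtain ⟨ma, k', vs, mb, hm, hv, hn, hpre, hna⟩ := ih h
      refine ⟨(k, v') :: ma, k', vs, mb, by simp [hm], hv, hn, hpre, ?_⟩
      intro p hp
      rcases (by simpa using hp : p = (k, v') ∨ p ∈ ma) with rfl | hp'
      · simpa [List.isPrefixOf_iff_prefix] using hk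
      · exact hna p hp'

-- main lemma: the nine sequential replaces equal the single scan
theorem pvFold_eq_scan : ∀ fuel l, l.length ≤ fuel → pvFold pvKV l = pvScan l := by
  intro fuel
  induction fuel with
  | zero =>
    intro l hl
    have : l = [] := by cases l <;> simp_all
    subst this
    rw [pvFold_nil, pvScan]
  | succ fuel ih =>
    intro l hl
    cases l with
    | nil => rw [pvFold_nil, pvScan]
    | cons c t =>
      by_cases hc : c = '"'
      · subst hc
        rw [pvScan]
        rw [if_pos rfl]
        cases hft : pvFindTok t pvMapping with
        | none =>
          have hna : ∀ p ∈ pvKV, ¬ pvK p.1 <+: t := by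
            intro p hp
            simp only [pvKV, List.mem_map] at hp
            obtain ⟨q, hq, rfl⟩ := hp
            exact pvFindTok_none pvMapping hft q hq
          rw [pvFold_cons_quote_nomatch pvKV (fun p hp => hp) t hna]
          rw [ih t (by simp at hl; omega)]
        | some vn =>
          obtain ⟨v, n⟩ := vn
          obtain ⟨ma, k, vs, mb, hm, hv, hn, hpre, hna⟩ := pvFindTok_some pvMapping hft
          -- decompose t = pvK k.toList ++ rest
          obtain ⟨rest, hrest⟩ := hpre
          have hklen : (pvK k.toList).length = n := by simp [pvK, hn]
          have hdrop : t.drop n = rest := by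
            rw [← hrest]
            exact List.drop_left' (by simp [hn])
          -- split pvKV along the found entry
          have hKV : pvKV = (ma.map fun p => (p.1.toList, p.2.toList)) ++
              (k.toList, vs.toList) :: (mb.map fun p => (p.1.toList, p.2.toList)) := by
            rw [pvKV, hm]; simp
          have hmemk : (k.toList, vs.toList) ∈ pvKV := by rw [hKV]; simp
          -- entries of ma pass over the matched token
          have hbka : ∀ p ∈ (ma.map fun p => (p.1.toList, p.2.toList)),
              pvBlockedB (pvTok p.1) (pvTok k.toList) = true := by
            intro p hp
            have hpKV : p ∈ pvKV := by rw [hKV]; simp [hp]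
            simp only [List.mem_map] at hp
            obtain ⟨q, hq, rfl⟩ := hp
            apply pvBlockedKeys _ hpKV (k.toList, vs.toList) hmemk
            intro hcontra
            simp only at hcontra
            exact hna q hq (hcontra ▸ ⟨rest, hrest⟩)
          -- entries of mb pass over the replacement token
          have hbvb : ∀ p ∈ (mb.map fun p => (p.1.toList, p.2.toList)),
              pvBlockedB (pvTok p.1) (pvTok vs.toList) = true := by
            intro p hp
            have hpKV : p ∈ pvKV := by rw [hKV]; simp [hp]
            exact pvBlockedVals p hpKV (k.toList, vs.toList) hmemk
          have hhead : ('"' :: t) = pvTok k.toList ++ rest := by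
            simp [pvTok, pvK, ← hrest]
          rw [hKV]
          simp only [pvFold, List.foldl_append, List.foldl_cons]
          rw [show ∀ s, (ma.map fun p => (p.1.toList, p.2.toList)).foldl
              (fun s p => pvRep (pvTok p.1) (pvTok p.2) s) s =
              pvFold (ma.map fun p => (p.1.toList, p.2.toList)) s from fun _ => rfl]
          rw [hhead, pvFold_append_keyblocked _ hbka rest]
          rw [pvRep_prefix _ _ (by rw [pvTok]; simp)]
          rw [show ∀ s, (mb.map fun p => (p.1.toList, p.2.toList)).foldl
              (fun s p => pvRep (pvTok p.1) (pvTok p.2) s) s =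
              pvFold (mb.map fun p => (p.1.toList, p.2.toList)) s from fun _ => rfl]
          rw [pvFold_append_keyblocked _ (by
            intro p hp
            exact hbvb p hp) (pvRep (pvTok k.toList) (pvTok vs.toList)
              (pvFold (ma.map fun p => (p.1.toList, p.2.toList)) rest))]
          have hfold : pvFold (mb.map fun p => (p.1.toList, p.2.toList))
              (pvRep (pvTok k.toList) (pvTok vs.toList)
                (pvFold (ma.map fun p => (p.1.toList, p.2.toList)) rest)) =
              pvFold pvKV rest := by
            rw [hKV]
            simp only [pvFold, List.foldl_append, List.foldl_cons]
          rw [hfold]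
          have hrl : rest.length ≤ fuel := by
            have := congrArg List.length hrest
            simp at this hl
            omega
          rw [ih rest hrl, hdrop, hv, pvTok, pvK]
      · rw [pvScan, if_neg hc]
        rw [pvFold_cons_nonquote hc pvKV t]
        rw [ih t (by simp at hl; omega)]

-- bridge from port A (String level) to pvFold (char level)
theorem pvPortA_fold (s : String) :
    ∀ (m : List (String × String)),
      (m.foldl (fun buf ot => PySem.Str.replace buf ("\"" ++ ot.1 ++ "\":")
        ("\"" ++ ot.2 ++ "\":")) s).toList =
      pvFold (m.map fun p => (p.1.toList, p.2.toList)) s.toList := by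
  intro m
  induction m generalizing s with
  | nil => rfl
  | cons p m ih =>
    simp only [List.foldl_cons, List.map_cons, pvFold]
    rw [ih]
    congr 1
    rw [PySem.Str.toList_replace]
    rw [pvReplace_eq _ _ _ (by simp)]
    congr 1 <;> simp [pvTok, pvK]

-- ===== VERDICT (by name: the statement is the Claim_ definition above) =====
theorem fixMergedVideoData_spec : Claim_equal_fixMergedVideoData := by
  intro json_buf _
  unfold Spec_fixMergedVideoData fixMergedVideoData fixMergedVideoData_alt
  apply String.toList_injective
  rw [pvPortA_fold json_buf _]
  rw [show ((([("Aid", "AVNum"), ("Name", "Topic"), ("Time", "UploadTime"),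
     ("Danmaku", "DMNum"), ("DMnum", "DMNum"), ("reply", "Comment"),
     ("favorite", "Save"), ("coin", "Coin"), ("like", "Like")] :
      List (String × String)).map fun p => (p.1.toList, p.2.toList)) = pvKV) from rfl]
  rw [pvFold_eq_scan json_buf.toList.length json_buf.toList (le_refl _)]
  simp
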